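-- pv_equiv track=rewrite | github.com/atakanozguryildiz/HackerRank | plus_minus.py | get_square_matrix
-- ===== SOURCE A (Python) =====
-- def get_square_matrix(row_and_length):
--
--     rows = []
--     lengths = []
--     for row, length in row_and_length:
--         rows.append(row)
--         lengths.append(length)
--     total_element_count = len(row_and_length)
--     for i in range(total_element_count):
--         row_length = lengths[i]
--         if row_length <= 1:
--             continue
--         if (i + row_length) > total_element_count:
--             continue
--
--         check_arr_lengths = lengths[i:i+row_length]
--         check_arr_rows = rows[i:i+row_length]
--         is_fail = False
--         result_arr = []
--         for j in range(len(check_arr_lengths)):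
--             check_row_length = check_arr_lengths[j]
--             if check_row_length < row_length:
--                 is_fail = True
--                 break
--             else:
--                 check_row = check_arr_rows[j][:row_length]
--                 result_arr.append(check_row)
--         if is_fail:
--             continue
--
--         return result_arr
--     return None
-- ===== SOURCE B (Python) =====
-- def get_square_matrix(row_and_length):
--     # Monotonic-stack next-strictly-smaller precomputation replaces A's inner window scans.
--     n = len(row_and_length)
--     lengths = [length for _, length in row_and_length]
--     nse = [n] * n           # nse[t] = index of first j > t with lengths[j] < lengths[t], else n
--     stack = []
--     for j in range(n):
--         v = lengths[j]
--         while stack and lengths[stack[-1]] > v: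
--             nse[stack.pop()] = j
--         stack.append(j)
--     for i in range(n):
--         k = lengths[i]
--         if k > 1 and i + k <= n and nse[i] >= i + k:
--             return [row[:k] for row, _ in row_and_length[i:i + k]]
--     return None
-- ===== Notes on version B (the rewrite author's own statement) =====
-- stated objective: alternative
-- what changed: A rescans each candidate window of size lengths[i] element by element; B precomputes with one monotonic-stack pass the next strictly smaller length for every index, so each window test becomes a single comparison nse[i] >= i+k.
import Mathlib
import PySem

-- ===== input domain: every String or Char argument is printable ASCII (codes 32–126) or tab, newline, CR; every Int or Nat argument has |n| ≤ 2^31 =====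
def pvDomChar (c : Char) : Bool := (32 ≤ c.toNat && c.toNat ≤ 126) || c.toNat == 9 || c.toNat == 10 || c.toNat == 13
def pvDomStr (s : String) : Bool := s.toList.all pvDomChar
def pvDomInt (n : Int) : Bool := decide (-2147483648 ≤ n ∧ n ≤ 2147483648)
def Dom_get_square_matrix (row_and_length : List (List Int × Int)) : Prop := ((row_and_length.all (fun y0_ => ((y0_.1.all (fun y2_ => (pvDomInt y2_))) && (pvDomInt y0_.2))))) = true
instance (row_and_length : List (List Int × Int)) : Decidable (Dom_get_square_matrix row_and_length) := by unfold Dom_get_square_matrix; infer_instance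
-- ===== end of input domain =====

-- B replaces A's element-by-element window rescans by a single monotonic-stack pass that
-- precomputes, for every index, the position of the next strictly smaller length.

-- ===== PORT A =====
-- inner 'for j in range(len(check_arr_lengths))' loop: walks the two window slices in
-- lockstep; 'is_fail = True; break' = none, otherwise the accumulated result_arr.
def pvAInner (k : Int) : List Int → List (List Int) → List (List Int) → Option (List (List Int))
  | [], _, acc => some acc
  | c :: cs, crs, acc =>
      if c < k then none
      else
        match crs with
        | [] => some acc          -- unreachable: the two slices always have equal length
        | r :: rs => pvAInner k cs rs (acc ++ [PySem.List.slice r none (some k)])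

-- outer 'for i in range(total_element_count)' loop with its two 'continue's and early return
def pvAOuter (rows : List (List Int)) (lengths : List Int) (n : Int) : List Int → Option (List (List Int))
  | [] => none
  | i :: rest =>
      let row_length := PySem.List.pyGetD lengths i 0
      if row_length ≤ 1 then pvAOuter rows lengths n rest
      else if n < i + row_length then pvAOuter rows lengths n rest
      else
        match pvAInner row_length
            (PySem.List.slice lengths (some i) (some (i + row_length)))
            (PySem.List.slice rows (some i) (some (i + row_length))) [] with
        | none => pvAOuter rows lengths n rest
        | some result_arr => some result_arr

def get_square_matrix (row_and_length : List (List Int × Int)) : Option (List (List Int)) :=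
  let p := row_and_length.foldl
    (fun (acc : List (List Int) × List Int) rl => (acc.1 ++ [rl.1], acc.2 ++ [rl.2])) ([], [])
  let rows := p.1
  let lengths := p.2
  let total_element_count : Int := row_and_length.length
  pvAOuter rows lengths total_element_count (PySem.List.pyRange 0 total_element_count 1)

-- ===== PORT B =====
-- 'while stack and lengths[stack[-1]] > v: nse[stack.pop()] = j' (stack top = list head)
def pvBPop (L : List Int) (j v : Int) : List Int → List Int → List Int × List Int
  | nse, [] => (nse, [])
  | nse, t :: ts =>
      if v < PySem.List.pyGetD L t 0 then pvBPop L j v (PySem.List.pySetD nse t j) ts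
      else (nse, t :: ts)

-- 'for j in range(n): … stack.append(j)'
def pvBBuild (L : List Int) : List Int → List Int × List Int → List Int × List Int
  | [], st => st
  | j :: js, st =>
      let v := PySem.List.pyGetD L j 0
      let r := pvBPop L j v st.1 st.2
      pvBBuild L js (r.1, j :: r.2)

-- second 'for i in range(n)' loop: first i whose window test passes
def pvBScan (rl : List (List Int × Int)) (L nse : List Int) (n : Int) :
    List Int → Option (List (List Int))
  | [] => none
  | i :: rest =>
      let k := PySem.List.pyGetD L i 0
      if 1 < k ∧ i + k ≤ n ∧ i + k ≤ PySem.List.pyGetD nse i 0 then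
        some ((PySem.List.slice rl (some i) (some (i + k))).map
          (fun p => PySem.List.slice p.1 none (some k)))
      else pvBScan rl L nse n rest

def get_square_matrix_alt (row_and_length : List (List Int × Int)) : Option (List (List Int)) :=
  let n : Int := row_and_length.length
  let lengths := row_and_length.map (fun p => p.2)
  let built := pvBBuild lengths (PySem.List.pyRange 0 n 1)
      (List.replicate row_and_length.length n, [])
  pvBScan row_and_length lengths built.1 n (PySem.List.pyRange 0 n 1)

-- ===== PRECONDITION & SPEC =====
def Spec_get_square_matrix (row_and_length : List (List Int × Int)) (out : Option (List (List Int))) : Prop := out = get_square_matrix_alt row_and_length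
instance (row_and_length : List (List Int × Int)) (out : Option (List (List Int))) : Decidable (Spec_get_square_matrix row_and_length out) := by unfold Spec_get_square_matrix; infer_instance

-- ===== CLAIM (what is proved, stated in full; the proofs are below) =====
def Claim_equal_get_square_matrix : Prop := ∀ (row_and_length : List (List Int × Int)), Dom_get_square_matrix row_and_length → Spec_get_square_matrix row_and_length (get_square_matrix row_and_length)

-- ===== LEMMAS AND PROOFS =====

-- nse[t] = m is a correct "next strictly smaller" answer for index t
def pvCorrect (L : List Int) (t m : Int) : Prop :=
  t < m ∧ m ≤ (L.length : Int) ∧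
  (∀ u : Int, t < u → u < m → PySem.List.pyGetD L t 0 ≤ PySem.List.pyGetD L u 0) ∧
  (m = (L.length : Int) ∨ PySem.List.pyGetD L m 0 < PySem.List.pyGetD L t 0)

-- loop invariant of B's stack pass after the first j indices have been processed
def pvInv (L nse stack : List Int) (j : Int) : Prop :=
  nse.length = L.length ∧
  stack.Pairwise (fun a b => b < a) ∧
  (∀ t ∈ stack, 0 ≤ t ∧ t < j) ∧
  stack.Pairwise (fun a b => PySem.List.pyGetD L b 0 ≤ PySem.List.pyGetD L a 0) ∧
  (∀ t ∈ stack, ∀ u : Int, t < u → u < j → PySem.List.pyGetD L t 0 ≤ PySem.List.pyGetD L u 0) ∧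
  (∀ t : Int, 0 ≤ t → t < j →
    (t ∈ stack ∧ PySem.List.pyGetD nse t 0 = (L.length : Int)) ∨
    (t ∉ stack ∧ pvCorrect L t (PySem.List.pyGetD nse t 0))) ∧
  (∀ t : Int, j ≤ t → t < (L.length : Int) → PySem.List.pyGetD nse t 0 = (L.length : Int))

lemma pvSetGet (xs : List Int) (t u v : Int) (h0 : 0 ≤ t) (h1 : t < (xs.length : Int))
    (hu : 0 ≤ u) :
    PySem.List.pyGetD (PySem.List.pySetD xs t v) u 0 =
      if u = t then v else PySem.List.pyGetD xs u 0 := by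
  have ht : t = ((t.toNat : Nat) : Int) := by omega
  have huu : u = ((u.toNat : Nat) : Int) := by omega
  rw [ht, huu, PySem.List.pyGetD_pySetD_natCast xs t.toNat u.toNat v 0 (by omega)]
  split_ifs <;> first | rfl | omega

lemma pvInvInit (L : List Int) : pvInv L (List.replicate L.length (L.length : Int)) [] 0 := by
  refine ⟨by simp, by simp, by simp, by simp, by simp, ?_, ?_⟩
  · intro t h1 h2; exact absurd h2 (by omega)
  · intro t h1 h2
    rw [PySem.List.pyGetD_eq_getElem _ 0 h1 (by simpa using h2)]
    simp

lemma pvStep (L : List Int) (j : Int) (h0 : 0 ≤ j) (hj : j < (L.length : Int)) :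
    ∀ stack nse, pvInv L nse stack j →
      pvInv L (pvBPop L j (PySem.List.pyGetD L j 0) nse stack).1
        (j :: (pvBPop L j (PySem.List.pyGetD L j 0) nse stack).2) (j + 1) := by
  intro stack
  induction stack with
  | nil =>
    intro nse hinv
    obtain ⟨h1, h2, h3, h4, h5, h6, h7⟩ := hinv
    simp only [pvBPop]
    refine ⟨h1, by simp, ?_, by simp, ?_, ?_, ?_⟩
    · intro t ht; simp at ht; omega
    · intro t ht u hu1 hu2; simp at ht; subst ht; exact absurd hu2 (by omega)
    · intro t ht1 ht2
      by_cases htj : t = j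
      · subst htj; exact Or.inl ⟨by simp, h7 t le_rfl hj⟩
      · rcases h6 t ht1 (by omega) with ⟨hin, _⟩ | ⟨_, hc⟩
        · exact absurd hin (by simp)
        · exact Or.inr ⟨by simp [htj], hc⟩
    · intro t ht1 ht2; exact h7 t (by omega) ht2
  | cons a ts ih =>
    intro nse hinv
    obtain ⟨h1, h2, h3, h4, h5, h6, h7⟩ := hinv
    have hpc := List.pairwise_cons.mp h2
    have hpc4 := List.pairwise_cons.mp h4
    have ha := h3 a (by simp)
    by_cases hpop : PySem.List.pyGetD L j 0 < PySem.List.pyGetD L a 0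
    · -- pop a, set nse[a] := j, continue on ts
      have hax : a < (nse.length : Int) := by rw [h1]; omega
      have hget : ∀ u : Int, 0 ≤ u →
          PySem.List.pyGetD (PySem.List.pySetD nse a j) u 0 =
            if u = a then j else PySem.List.pyGetD nse u 0 :=
        fun u hu => pvSetGet nse a u j ha.1 hax hu
      have hinv' : pvInv L (PySem.List.pySetD nse a j) ts j := by
        refine ⟨by rw [PySem.List.length_pySetD]; exact h1, hpc.2, ?_, hpc4.2, ?_, ?_, ?_⟩
        · exact fun t ht => h3 t (List.mem_cons_of_mem _ ht)
        · exact fun t ht u hu1 hu2 => h5 t (List.mem_cons_of_mem _ ht) u hu1 hu2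
        · intro t ht1 ht2
          rcases h6 t ht1 ht2 with ⟨hin, hv⟩ | ⟨hnin, hc⟩
          · rcases List.mem_cons.mp hin with rfl | hin'
            · refine Or.inr ⟨fun hmem => by have := hpc.1 t hmem; omega, ?_⟩
              rw [hget t ht1, if_pos rfl]
              exact ⟨ha.2, by omega, fun u hu1 hu2 => h5 t (by simp) u hu1 hu2, Or.inr hpop⟩
            · have hne : t ≠ a := by have := hpc.1 t hin'; omega
              exact Or.inl ⟨hin', by rw [hget t ht1, if_neg hne]; exact hv⟩
          · have hne : t ≠ a := fun he => hnin (by simp [he])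
            exact Or.inr ⟨fun hm => hnin (List.mem_cons_of_mem _ hm),
              by rw [hget t ht1, if_neg hne]; exact hc⟩
        · intro t ht1 ht2
          rw [hget t (by omega), if_neg (by omega)]
          exact h7 t ht1 ht2
      have hres : pvBPop L j (PySem.List.pyGetD L j 0) nse (a :: ts) =
          pvBPop L j (PySem.List.pyGetD L j 0) (PySem.List.pySetD nse a j) ts := by
        simp only [pvBPop, if_pos hpop]
      rw [hres]
      exact ih _ hinv'
    · -- stop: keep a :: ts, push j
      have hres : pvBPop L j (PySem.List.pyGetD L j 0) nse (a :: ts) = (nse, a :: ts) := by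
        simp only [pvBPop, if_neg hpop]
      rw [hres]
      refine ⟨h1, ?_, ?_, ?_, ?_, ?_, ?_⟩
      · exact List.pairwise_cons.mpr ⟨fun t ht => (h3 t ht).2, h2⟩
      · intro t ht
        rcases List.mem_cons.mp ht with rfl | ht'
        · exact ⟨h0, by omega⟩
        · have := h3 t ht'; exact ⟨this.1, by omega⟩
      · refine List.pairwise_cons.mpr ⟨?_, h4⟩
        intro t ht
        rcases List.mem_cons.mp ht with rfl | ht'
        · exact not_lt.mp hpop
        · exact le_trans (hpc4.1 t ht') (not_lt.mp hpop)
      · intro t ht u hu1 hu2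
        rcases List.mem_cons.mp ht with rfl | ht'
        · exact absurd hu2 (by omega)
        · by_cases huj : u = j
          · subst huj
            rcases List.mem_cons.mp ht' with rfl | ht''
            · exact not_lt.mp hpop
            · exact le_trans (hpc4.1 t ht'') (not_lt.mp hpop)
          · have hu2' : u < j := by
              have := h3 t ht'; omega
            exact h5 t ht' u hu1 hu2'
      · intro t ht1 ht2
        by_cases htj : t = j
        · subst htj; exact Or.inl ⟨by simp, h7 t le_rfl hj⟩
        · rcases h6 t ht1 (by omega) with ⟨hin, hv⟩ | ⟨hnin, hc⟩
          · exact Or.inl ⟨List.mem_cons_of_mem _ hin, hv⟩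
          · refine Or.inr ⟨?_, hc⟩
            intro hm
            rcases List.mem_cons.mp hm with rfl | hm'
            · exact htj rfl
            · exact hnin hm'
      · intro t ht1 ht2; exact h7 t (by omega) ht2

lemma pvBuildFrom (L : List Int) :
    ∀ (d : Nat) (j : Int) (nse stack : List Int), 0 ≤ j → j + (d : Int) = (L.length : Int) →
      pvInv L nse stack j →
      pvInv L (pvBBuild L (PySem.List.pyRange j (L.length : Int) 1) (nse, stack)).1
        (pvBBuild L (PySem.List.pyRange j (L.length : Int) 1) (nse, stack)).2
        (L.length : Int) := by
  intro d
  induction d with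
  | zero =>
    intro j nse stack hj0 hjd hinv
    rw [PySem.List.pyRange_one_eq_nil (by omega)]
    have hje : j = (L.length : Int) := by omega
    rw [hje] at hinv
    simpa only [pvBBuild] using hinv
  | succ d ihd =>
    intro j nse stack hj0 hjd hinv
    have hjlt : j < (L.length : Int) := by push_cast at hjd; omega
    rw [PySem.List.pyRange_one_cons hjlt]
    simp only [pvBBuild]
    exact ihd (j + 1) _ _ (by omega) (by push_cast at hjd ⊢; omega)
      (pvStep L j hj0 hjlt stack nse hinv)

lemma pvFinalCorrect (L nse stack : List Int) (h : pvInv L nse stack (L.length : Int)) :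
    ∀ t : Int, 0 ≤ t → t < (L.length : Int) → pvCorrect L t (PySem.List.pyGetD nse t 0) := by
  intro t ht1 ht2
  obtain ⟨h1, h2, h3, h4, h5, h6, h7⟩ := h
  rcases h6 t ht1 ht2 with ⟨hin, hv⟩ | ⟨_, hc⟩
  · rw [hv]; exact ⟨ht2, le_rfl, fun u hu1 hu2 => h5 t hin u hu1 hu2, Or.inl rfl⟩
  · exact hc

lemma pvAInnerSpec (k : Int) :
    ∀ (cls : List Int) (crs : List (List Int)) (acc : List (List Int)),
      cls.length = crs.length →
      pvAInner k cls crs acc =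
        if ∀ c ∈ cls, ¬ c < k then
          some (acc ++ crs.map (fun r => PySem.List.slice r none (some k)))
        else none := by
  intro cls
  induction cls with
  | nil =>
    intro crs acc h
    have : crs = [] := by
      cases crs with
      | nil => rfl
      | cons r rs => simp at h
    subst this
    simp [pvAInner]
  | cons c cs ihc =>
    intro crs acc h
    cases crs with
    | nil => simp at h
    | cons r rs =>
      simp only [pvAInner]
      by_cases hck : c < k
      · rw [if_pos hck, if_neg (fun hall => (hall c (by simp)) hck)]
      · rw [if_neg hck, ihc rs _ (by simpa using h)]
        by_cases hall : ∀ c' ∈ cs, ¬ c' < k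
        · rw [if_pos hall, if_pos ?_]
          · simp
          · intro c' hc'
            rcases List.mem_cons.mp hc' with rfl | h'
            · exact hck
            · exact hall c' h'
        · rw [if_neg hall,
            if_neg (fun hallc => hall (fun c' h' => hallc c' (List.mem_cons_of_mem _ h')))]

lemma pvWindowIff (L : List Int) (a b : Nat) (hab : a + b ≤ L.length) (k : Int) :
    (∀ c ∈ (L.drop a).take b, ¬ c < k) ↔
      (∀ p : Nat, p < b → k ≤ PySem.List.pyGetD L ((a : Int) + p) 0) := by
  have hwl : ((L.drop a).take b).length = b := by
    simp [List.length_take, List.length_drop]; omega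
  constructor
  · intro hmem p hp
    have hlt : a + p < L.length := by omega
    have hplen : p < ((L.drop a).take b).length := by omega
    have he : ((L.drop a).take b)[p]'hplen = L[a + p]'hlt := by
      simp [List.getElem_take, List.getElem_drop]
    have hm := hmem _ (he ▸ List.getElem_mem hplen)
    rw [PySem.List.pyGetD_eq_getElem _ _ (by omega) (by omega)]
    have hidx : (((a : Int) + p).toNat) = a + p := by omega
    simp only [hidx]
    exact not_lt.mp hm
  · intro hidx c hcmem
    obtain ⟨p, hplen, he⟩ := List.mem_iff_getElem.mp hcmem
    have hp : p < b := by omega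
    have hlt : a + p < L.length := by omega
    have := hidx p hp
    rw [PySem.List.pyGetD_eq_getElem _ _ (by omega) (by omega)] at this
    have hidx2 : (((a : Int) + p).toNat) = a + p := by omega
    simp only [hidx2] at this
    have he2 : ((L.drop a).take b)[p]'hplen = L[a + p]'hlt := by
      simp [List.getElem_take, List.getElem_drop]
    rw [← he, he2]
    exact not_lt.mpr this

lemma pvCondIff (L nse : List Int) (i : Int) (_h0 : 0 ≤ i) (_hi : i < (L.length : Int))
    (hc : pvCorrect L i (PySem.List.pyGetD nse i 0))
    (k : Int) (hk : k = PySem.List.pyGetD L i 0) (hk1 : 1 < k) (hik : i + k ≤ (L.length : Int)) :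
    ((∀ p : Nat, p < k.toNat → k ≤ PySem.List.pyGetD L (i + p) 0) ↔
      i + k ≤ PySem.List.pyGetD nse i 0) := by
  obtain ⟨hc1, hc2, hc3, hc4⟩ := hc
  constructor
  · intro hall
    by_contra hlt
    rw [not_le] at hlt
    have hmn : PySem.List.pyGetD nse i 0 ≠ (L.length : Int) := by omega
    have hm4 := hc4.resolve_left hmn
    have hx := hall (PySem.List.pyGetD nse i 0 - i).toNat (by omega)
    rw [show (i + ((PySem.List.pyGetD nse i 0 - i).toNat : Int)) = PySem.List.pyGetD nse i 0
      by omega] at hx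
    exact absurd hx (not_le.mpr (hk ▸ hm4))
  · intro hm p hp
    by_cases hp0 : p = 0
    · subst hp0
      rw [show (i + ((0 : Nat) : Int)) = i by omega, hk]
    · have := hc3 (i + p) (by omega) (by omega)
      exact hk ▸ this

lemma pvScanEq (rl : List (List Int × Int)) (L : List Int) (R : List (List Int))
    (nse : List Int)
    (hLeq : L = rl.map (fun p => p.2)) (hReq : R = rl.map (fun p => p.1))
    (hs : ∀ t : Int, 0 ≤ t → t < (rl.length : Int) → pvCorrect L t (PySem.List.pyGetD nse t 0)) :
    ∀ idxs : List Int, (∀ i ∈ idxs, 0 ≤ i ∧ i < (rl.length : Int)) →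
      pvAOuter R L (rl.length : Int) idxs = pvBScan rl L nse (rl.length : Int) idxs := by
  intro idxs
  induction idxs with
  | nil => intro _; simp [pvAOuter, pvBScan]
  | cons i rest ih =>
    intro hmem
    have hi := hmem i (by simp)
    have hrest : ∀ x ∈ rest, 0 ≤ x ∧ x < (rl.length : Int) :=
      fun x hx => hmem x (List.mem_cons_of_mem _ hx)
    have hLlen : L.length = rl.length := by rw [hLeq]; simp
    have hRlen : R.length = rl.length := by rw [hReq]; simp
    simp only [pvAOuter, pvBScan]
    by_cases hk1 : PySem.List.pyGetD L i 0 ≤ 1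
    · rw [if_pos hk1, if_neg (fun h => absurd h.1 (not_lt.mpr hk1))]
      exact ih hrest
    · rw [if_neg hk1]
      by_cases hik : (rl.length : Int) < i + PySem.List.pyGetD L i 0
      · rw [if_pos hik, if_neg (fun h => absurd h.2.1 (not_le.mpr hik))]
        exact ih hrest
      · rw [if_neg hik]
        have h0 : 0 ≤ i := hi.1
        have hiL : i < (L.length : Int) := by rw [hLlen]; exact hi.2
        obtain ⟨knat, hkeq⟩ : ∃ m : Nat, PySem.List.pyGetD L i 0 = (m : Int) :=
          ⟨(PySem.List.pyGetD L i 0).toNat, by omega⟩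
        obtain ⟨inat, hieq⟩ : ∃ m : Nat, i = (m : Int) := ⟨i.toNat, by omega⟩
        rw [hkeq, hieq]
        have hk1' : 1 < (knat : Int) := by omega
        have hkn : inat + knat ≤ L.length := by
          have := not_lt.mp hik
          omega
        have hsum : ((inat : Int) + (knat : Int)) = ((inat + knat : Nat) : Int) := by omega
        have hsliceL : PySem.List.slice L (some ((inat : Nat) : Int))
            (some ((inat : Int) + (knat : Int))) = (L.drop inat).take knat := by
          rw [hsum, PySem.List.slice_natCast]
          congr 1
          omega
        have hsliceR : PySem.List.slice R (some ((inat : Nat) : Int))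
            (some ((inat : Int) + (knat : Int))) = (R.drop inat).take knat := by
          rw [hsum, PySem.List.slice_natCast]
          congr 1
          omega
        have hsliceRl : PySem.List.slice rl (some ((inat : Nat) : Int))
            (some ((inat : Int) + (knat : Int))) = (rl.drop inat).take knat := by
          rw [hsum, PySem.List.slice_natCast]
          congr 1
          omega
        rw [hsliceL, hsliceR,
          pvAInnerSpec ((knat : Nat) : Int) ((L.drop inat).take knat) ((R.drop inat).take knat) []
            (by simp [List.length_take, List.length_drop, hLlen, hRlen])]
        have hwin := pvWindowIff L inat knat hkn ((knat : Nat) : Int)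
        have hcond := pvCondIff L nse i h0 hiL (hs i h0 hi.2) ((knat : Nat) : Int) hkeq.symm
          hk1' (by omega)
        rw [hieq] at hcond
        have htn : (((knat : Nat) : Int)).toNat = knat := by omega
        rw [htn] at hcond
        by_cases hALL : ∀ c ∈ (L.drop inat).take knat, ¬ c < ((knat : Nat) : Int)
        · rw [if_pos hALL, if_pos ⟨hk1', by omega, hcond.mp (hwin.mp hALL)⟩]
          rw [hsliceRl, hReq]
          simp [List.map_take, List.map_drop, List.map_map, Function.comp_def]
        · rw [if_neg hALL, if_neg ?_]
          · exact ih hrest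
          · rintro ⟨-, -, hb3⟩
            exact hALL (hwin.mpr (hcond.mpr hb3))

-- ===== VERDICT (by name: the statement is the Claim_ definition above) =====
theorem get_square_matrix_spec : Claim_equal_get_square_matrix := by
  intro rl _
  unfold Spec_get_square_matrix get_square_matrix get_square_matrix_alt
  have hrows : rl.foldl
      (fun (acc : List (List Int) × List Int) p => (acc.1 ++ [p.1], acc.2 ++ [p.2])) ([], []) =
      (rl.map (fun p => p.1), rl.map (fun p => p.2)) := by
    rw [PySem.List.foldl_prod_mk (f := fun (a : List (List Int)) (e : List Int × Int) => a ++ [e.1])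
        (g := fun (a : List Int) (e : List Int × Int) => a ++ [e.2])]
    rw [PySem.List.foldl_append_singleton_eq_map, PySem.List.foldl_append_singleton_eq_map]
    simp
  simp only [hrows]
  have hL : (rl.map (fun p => p.2)).length = rl.length := by simp
  have hinv := pvBuildFrom (rl.map (fun p => p.2)) (rl.map (fun p => p.2)).length 0
      (List.replicate (rl.map (fun p => p.2)).length (((rl.map (fun p => p.2)).length : Nat) : Int))
      [] le_rfl (by simp) (pvInvInit (rl.map (fun p => p.2)))
  rw [hL] at hinv
  exact pvScanEq rl (rl.map (fun p => p.2)) (rl.map (fun p => p.1)) _ rfl rfl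
    (fun t ht1 ht2 => pvFinalCorrect _ _ _ (by rw [hL]; exact hinv) t ht1
      (by rw [hL]; exact ht2))
    (PySem.List.pyRange 0 (rl.length : Int) 1)
    (fun i hi => by have := PySem.List.mem_pyRange_one.mp hi; omega)
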